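-- pv_equiv track=rewrite | github.com/Devskg04/CouncilOfAgents | backend/agents/final_decision_agent.py | _format_failed_factors
-- ===== SOURCE A (Python) =====
-- from typing import Dict, Set, List
--
-- def _format_failed_factors(factor_outcomes: Dict) -> str:
--     """Format failed/weak/rejected factors."""
--     lines = []
--
--     if factor_outcomes.get('rejected'):
--         lines.append("REJECTED FACTORS:")
--         for factor in factor_outcomes['rejected']:
--             lines.append(f"  - Factor {factor['factor_id']}: {factor['factor_name']}")
--             lines.append(f"    Rejected by: {factor.get('rejected_by', 'Unknown')}")
--             lines.append(f"    Reason: {factor['reason']}")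
--
--     if factor_outcomes.get('weak'):
--         lines.append("\nWEAK FACTORS:")
--         for factor in factor_outcomes['weak']:
--             lines.append(f"  - Factor {factor['factor_id']}: {factor['factor_name']}")
--             lines.append(f"    Reason: {factor['reason']}")
--
--     if factor_outcomes.get('partially_accepted'):
--         lines.append("\nPARTIALLY ACCEPTED FACTORS:")
--         for factor in factor_outcomes['partially_accepted']:
--             lines.append(f"  - Factor {factor['factor_id']}: {factor['factor_name']}")
--             lines.append(f"    Reason: {factor['reason']}")
--
--     if factor_outcomes.get('failed'):
--         lines.append("\nFAILED FACTORS:")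
--         for factor in factor_outcomes['failed']:
--             lines.append(f"  - Factor {factor['factor_id']}: {factor['factor_name']}")
--             lines.append(f"    Reason: {factor['reason']}")
--
--     return "\n".join(lines) if lines else "No failed/weak/rejected factors identified."
-- ===== SOURCE B (Python) =====
-- def _format_failed_factors(factor_outcomes):
--     """Format failed/weak/rejected factors: recursive back-to-front string builder, no lines list."""
--
--     def chunk(factor, with_rejected_by):
--         s = f"  - Factor {factor['factor_id']}: {factor['factor_name']}"
--         if with_rejected_by:
--             s += f"\n    Rejected by: {factor.get('rejected_by', 'Unknown')}"
--         return s + f"\n    Reason: {factor['reason']}"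
--
--     def build(sections):
--         if not sections:
--             return ""
--         key, title, with_rej = sections[0]
--         rest = build(sections[1:])
--         factors = factor_outcomes.get(key)
--         if not factors:
--             return rest
--         block = title
--         for f in factors:
--             block += "\n" + chunk(f, with_rej)
--         return block + "\n" + rest if rest else block
--
--     out = build([("rejected", "REJECTED FACTORS:", True),
--                  ("weak", "\nWEAK FACTORS:", False),
--                  ("partially_accepted", "\nPARTIALLY ACCEPTED FACTORS:", False),
--                  ("failed", "\nFAILED FACTORS:", False)])
--     return out if out else "No failed/weak/rejected factors identified."
-- ===== Notes on version B (the rewrite author's own statement) =====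
-- stated objective: alternative
-- what changed: Instead of appending lines to a list in four unrolled if-blocks and joining at the end, B recursively builds the output string back-to-front over the section table, formatting each factor as one multi-line chunk string and concatenating blocks directly, with no lines list and no join.
import Mathlib
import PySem

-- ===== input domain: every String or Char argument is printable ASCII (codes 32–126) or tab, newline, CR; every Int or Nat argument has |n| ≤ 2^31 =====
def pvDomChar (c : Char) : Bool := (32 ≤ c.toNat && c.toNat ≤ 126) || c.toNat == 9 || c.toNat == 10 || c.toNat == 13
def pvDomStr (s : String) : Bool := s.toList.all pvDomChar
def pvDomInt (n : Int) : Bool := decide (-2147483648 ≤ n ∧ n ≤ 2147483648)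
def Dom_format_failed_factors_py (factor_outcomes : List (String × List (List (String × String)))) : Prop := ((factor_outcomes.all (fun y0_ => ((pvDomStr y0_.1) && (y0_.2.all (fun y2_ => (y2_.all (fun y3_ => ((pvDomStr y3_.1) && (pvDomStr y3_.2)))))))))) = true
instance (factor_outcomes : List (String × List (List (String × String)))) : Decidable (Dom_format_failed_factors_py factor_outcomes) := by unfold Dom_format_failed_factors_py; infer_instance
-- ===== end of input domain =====

-- B replaces A's four unrolled list-append/join blocks by a recursive back-to-front builder that
-- concatenates one multi-line chunk string per factor, with no lines list and no join; objective: alternative.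

-- factor[k] (KeyError excluded by Pre_; on excluded inputs the default is never relied upon)
def pvItem (f : List (String × String)) (k : String) : String :=
  ((PySem.Dict.mk f).get? k).getD ""

-- ===== PORT A =====
def format_failed_factors_py (factor_outcomes : List (String × List (List (String × String)))) : String :=
  let lines : List String := []
  let r := (PySem.Dict.mk factor_outcomes).getD "rejected" []
  let lines := if r.isEmpty then lines else
    r.foldl (fun acc factor => acc ++
      ["  - Factor " ++ pvItem factor "factor_id" ++ ": " ++ pvItem factor "factor_name",
       "    Rejected by: " ++ (PySem.Dict.mk factor).getD "rejected_by" "Unknown",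
       "    Reason: " ++ pvItem factor "reason"]) (lines ++ ["REJECTED FACTORS:"])
  let w := (PySem.Dict.mk factor_outcomes).getD "weak" []
  let lines := if w.isEmpty then lines else
    w.foldl (fun acc factor => acc ++
      ["  - Factor " ++ pvItem factor "factor_id" ++ ": " ++ pvItem factor "factor_name",
       "    Reason: " ++ pvItem factor "reason"]) (lines ++ ["\nWEAK FACTORS:"])
  let p := (PySem.Dict.mk factor_outcomes).getD "partially_accepted" []
  let lines := if p.isEmpty then lines else
    p.foldl (fun acc factor => acc ++
      ["  - Factor " ++ pvItem factor "factor_id" ++ ": " ++ pvItem factor "factor_name",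
       "    Reason: " ++ pvItem factor "reason"]) (lines ++ ["\nPARTIALLY ACCEPTED FACTORS:"])
  let f := (PySem.Dict.mk factor_outcomes).getD "failed" []
  let lines := if f.isEmpty then lines else
    f.foldl (fun acc factor => acc ++
      ["  - Factor " ++ pvItem factor "factor_id" ++ ": " ++ pvItem factor "factor_name",
       "    Reason: " ++ pvItem factor "reason"]) (lines ++ ["\nFAILED FACTORS:"])
  if lines.isEmpty then "No failed/weak/rejected factors identified." else PySem.Str.join "\n" lines

-- ===== PORT B =====
-- chunk(factor, with_rejected_by): one factor as a single multi-line string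
def pvChunk (factor : List (String × String)) (withRejectedBy : Bool) : String :=
  let s := "  - Factor " ++ pvItem factor "factor_id" ++ ": " ++ pvItem factor "factor_name"
  let s := if withRejectedBy then
    s ++ ("\n    Rejected by: " ++ (PySem.Dict.mk factor).getD "rejected_by" "Unknown") else s
  s ++ ("\n    Reason: " ++ pvItem factor "reason")

-- build(sections): recursion on the section table, the tail's text built first
def pvBuild (factor_outcomes : List (String × List (List (String × String)))) :
    List (String × String × Bool) → String
  | [] => ""
  | sec :: sections =>
    let rest := pvBuild factor_outcomes sections
    let factors := (PySem.Dict.mk factor_outcomes).getD sec.1 []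
    if factors.isEmpty then rest
    else
      let block := factors.foldl (fun acc f => acc ++ ("\n" ++ pvChunk f sec.2.2)) sec.2.1
      if rest.isEmpty then block else block ++ ("\n" ++ rest)

def format_failed_factors_py_alt (factor_outcomes : List (String × List (List (String × String)))) : String :=
  let out := pvBuild factor_outcomes
    [("rejected", "REJECTED FACTORS:", true),
     ("weak", "\nWEAK FACTORS:", false),
     ("partially_accepted", "\nPARTIALLY ACCEPTED FACTORS:", false),
     ("failed", "\nFAILED FACTORS:", false)]
  if out.isEmpty then "No failed/weak/rejected factors identified." else out

-- ===== PRECONDITION & SPEC =====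
-- Pre_ excludes exactly the inputs where the Python A raises KeyError: a factor in one of the
-- four formatted sections missing 'factor_id', 'factor_name' or 'reason'.
def Pre_format_failed_factors_py (factor_outcomes : List (String × List (List (String × String)))) : Prop :=
  ∀ k ∈ ["rejected", "weak", "partially_accepted", "failed"],
    ∀ f ∈ (PySem.Dict.mk factor_outcomes).getD k [],
      (PySem.Dict.mk f).contains "factor_id" = true ∧
      (PySem.Dict.mk f).contains "factor_name" = true ∧
      (PySem.Dict.mk f).contains "reason" = true
instance (factor_outcomes : List (String × List (List (String × String)))) : Decidable (Pre_format_failed_factors_py factor_outcomes) := by unfold Pre_format_failed_factors_py; infer_instance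

def pvWitness_format_failed_factors_py : (List (String × List (List (String × String)))) :=
  [("rejected", [[("factor_id", "1"), ("factor_name", "n"), ("reason", "r")]]), ("weak", [])]

def Spec_format_failed_factors_py (factor_outcomes : List (String × List (List (String × String)))) (out : String) : Prop := out = format_failed_factors_py_alt factor_outcomes
instance (factor_outcomes : List (String × List (List (String × String)))) (out : String) : Decidable (Spec_format_failed_factors_py factor_outcomes out) := by unfold Spec_format_failed_factors_py; infer_instance

-- ===== CLAIM =====
def Claim_equal_format_failed_factors_py : Prop := ∀ (factor_outcomes : List (String × List (List (String × String)))), Dom_format_failed_factors_py factor_outcomes → Pre_format_failed_factors_py factor_outcomes → Spec_format_failed_factors_py factor_outcomes (format_failed_factors_py factor_outcomes)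

-- ===== LEMMAS AND PROOFS =====

-- the per-factor lines as A produces them
def pvChunkLines (f : List (String × String)) (rej : Bool) : List String :=
  ["  - Factor " ++ pvItem f "factor_id" ++ ": " ++ pvItem f "factor_name"]
  ++ (if rej then ["    Rejected by: " ++ (PySem.Dict.mk f).getD "rejected_by" "Unknown"] else [])
  ++ ["    Reason: " ++ pvItem f "reason"]

-- A's lines list, per section table
def pvLinesOf (fo : List (String × List (List (String × String)))) (secs : List (String × String × Bool)) : List String :=
  secs.flatMap (fun sec =>
    let fs := (PySem.Dict.mk fo).getD sec.1 []
    if fs.isEmpty then [] else sec.2.1 :: fs.flatMap (fun f => pvChunkLines f sec.2.2))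

-- "\n".join as structural recursion
def pvSJ : List String → String
  | [] => ""
  | [a] => a
  | a :: b :: l => a ++ ("\n" ++ pvSJ (b :: l))

theorem pvSJ_eq_join (l : List String) (h : l ≠ []) : PySem.Str.join "\n" l = pvSJ l := by
  match l with
  | [a] => simp [pvSJ, PySem.Str.join, PySem.Chars.join_singleton]
  | a :: b :: l =>
    have ih := pvSJ_eq_join (b :: l) (by simp)
    simp only [pvSJ, ← ih, PySem.Str.join, List.map_cons]
    rw [PySem.Chars.join_cons_cons]
    apply String.toList_inj.mp
    simp

theorem pvSJ_chunk (a : String) (L : List String) (f : List (String × String)) (rej : Bool) :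
    pvSJ (a :: pvChunkLines f rej ++ L) = pvSJ ((a ++ ("\n" ++ pvChunk f rej)) :: L) := by
  cases rej <;> cases L <;>
    (apply String.toList_inj.mp; simp [pvChunkLines, pvChunk, pvSJ])

theorem pvFoldl_chunk (fs : List (List (String × String))) (rej : Bool) (a : String) :
    fs.foldl (fun acc f => acc ++ ("\n" ++ pvChunk f rej)) a
      = pvSJ (a :: fs.flatMap (fun f => pvChunkLines f rej)) := by
  induction fs generalizing a with
  | nil => simp [pvSJ]
  | cons f fs ih =>
    simp only [List.foldl_cons, List.flatMap_cons, ih]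
    rw [← pvSJ_chunk]
    simp

theorem pvSJ_append (M Y : List String) (a : String) :
    pvSJ ((a :: M) ++ Y) = (if Y.isEmpty then pvSJ (a :: M) else pvSJ (a :: M) ++ ("\n" ++ pvSJ Y)) := by
  induction M generalizing a with
  | nil => cases Y <;> simp [pvSJ]
  | cons m M ih =>
    cases Y with
    | nil => simp
    | cons y Y =>
      have h := ih m
      simp only [List.cons_append, List.isEmpty_cons, Bool.false_eq_true, if_false, pvSJ] at h ⊢
      rw [h]
      apply String.toList_inj.mp
      simp

theorem pvAppend_ne (a b : String) (h : a.isEmpty = false) : (a ++ b).isEmpty = false := by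
  rw [Bool.eq_false_iff] at h ⊢
  rw [Ne, String.isEmpty_iff] at h ⊢
  intro hc
  have := congrArg String.toList hc
  simp at this
  exact h (String.toList_inj.mp (by simp [this.1]))

theorem pvSJ_cons_ne (a : String) (M : List String) (h : a.isEmpty = false) :
    (pvSJ (a :: M)).isEmpty = false := by
  cases M with
  | nil => simpa [pvSJ]
  | cons b M =>
    simp only [pvSJ]
    exact pvAppend_ne a ("\n" ++ pvSJ (b :: M)) h

theorem pvLinesOf_cons (fo : List (String × List (List (String × String)))) (sec : String × String × Bool)
    (secs : List (String × String × Bool)) :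
    pvLinesOf fo (sec :: secs) =
      (if ((PySem.Dict.mk fo).getD sec.1 []).isEmpty then [] else
        sec.2.1 :: ((PySem.Dict.mk fo).getD sec.1 []).flatMap (fun f => pvChunkLines f sec.2.2))
      ++ pvLinesOf fo secs := by
  simp [pvLinesOf]

theorem pvBuild_eq (fo : List (String × List (List (String × String)))) (secs : List (String × String × Bool))
    (ht : ∀ s ∈ secs, s.2.1.isEmpty = false) :
    pvBuild fo secs = pvSJ (pvLinesOf fo secs) ∧
      (pvBuild fo secs).isEmpty = (pvLinesOf fo secs).isEmpty := by
  induction secs with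
  | nil => simp [pvBuild, pvLinesOf, pvSJ]
  | cons sec secs ih =>
    obtain ⟨ih1, ih2⟩ := ih (fun s hs => ht s (List.mem_cons_of_mem _ hs))
    have htitle : sec.2.1.isEmpty = false := ht sec (List.mem_cons_self ..)
    rw [pvLinesOf_cons]
    have key : (pvSJ (pvLinesOf fo secs)).isEmpty = (pvLinesOf fo secs).isEmpty := by
      rw [← ih1]; exact ih2
    simp only [pvBuild, pvFoldl_chunk, ih1]
    by_cases hfs : ((PySem.Dict.mk fo).getD sec.1 []).isEmpty = true
    · simp [hfs, key]
    · have hfs' : ((PySem.Dict.mk fo).getD sec.1 []).isEmpty = false := by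
        simpa using hfs
      simp only [hfs', Bool.false_eq_true, if_false]
      rw [pvSJ_append, key]
      have hne := pvSJ_cons_ne sec.2.1
        (((PySem.Dict.mk fo).getD sec.1 []).flatMap (fun f => pvChunkLines f sec.2.2)) htitle
      constructor
      · rfl
      · split_ifs with h1
        · simp [hne]
        · simp [pvAppend_ne _ _ hne]

-- A's result in terms of pvLinesOf
theorem pvA_eq (fo : List (String × List (List (String × String)))) :
    format_failed_factors_py fo =
      (if (pvLinesOf fo [("rejected", "REJECTED FACTORS:", true),
        ("weak", "\nWEAK FACTORS:", false),
        ("partially_accepted", "\nPARTIALLY ACCEPTED FACTORS:", false),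
        ("failed", "\nFAILED FACTORS:", false)]).isEmpty
       then "No failed/weak/rejected factors identified."
       else PySem.Str.join "\n" (pvLinesOf fo [("rejected", "REJECTED FACTORS:", true),
        ("weak", "\nWEAK FACTORS:", false),
        ("partially_accepted", "\nPARTIALLY ACCEPTED FACTORS:", false),
        ("failed", "\nFAILED FACTORS:", false)])) := by
  simp only [format_failed_factors_py, pvLinesOf, pvChunkLines, List.flatMap_cons, List.flatMap_nil,
    PySem.List.foldl_append_eq_flatMap, List.append_nil]
  split_ifs <;> simp_all [List.flatMap_def]

-- ===== VERDICT =====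
theorem format_failed_factors_py_spec : Claim_equal_format_failed_factors_py := by
  intro fo _ _
  show _ = _
  rw [pvA_eq]
  obtain ⟨h1, h2⟩ := pvBuild_eq fo
    [("rejected", "REJECTED FACTORS:", true),
     ("weak", "\nWEAK FACTORS:", false),
     ("partially_accepted", "\nPARTIALLY ACCEPTED FACTORS:", false),
     ("failed", "\nFAILED FACTORS:", false)] (by decide)
  simp only [format_failed_factors_py_alt, h2]
  split_ifs with h
  · rfl
  · rw [h1, pvSJ_eq_join]
    intro hc
    simp [hc] at h
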